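-- pv_equiv track=rewrite | github.com/mushroomsoda825/xin-yuan-tools | pages/1_数字转换助手.py | to_chinese_upper
-- ===== SOURCE A (Python) =====
-- def to_chinese_upper(num):
--     """转换数字为中文大写金额"""
--     units = ['', '拾', '佰', '仟', '万', '拾', '佰', '仟', '亿']
--     digits = '零壹贰叁肆伍陆柒捌玖'
--     try:
--         s = str(int(num))[::-1]
--         res = []
--         for i, d in enumerate(s):
--             if d != '0':
--                 res.append(units[i % 9])
--                 res.append(digits[int(d)])
--             else:
--                 if not res or res[-1] != '零':
--                     res.append('零')
--         result = "".join(res[::-1]).rstrip('零')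
--         return result + "元整" if result else "零元整"
--     except:
--         return "转换出错"
-- ===== SOURCE B (Python) =====
-- def to_chinese_upper(num):
--     """转换数字为中文大写金额"""
--     units = ['', '拾', '佰', '仟', '万', '拾', '佰', '仟', '亿']
--     digits = '零壹贰叁肆伍陆柒捌玖'
--     try:
--         digs = str(int(num))
--         n = len(digs)
--         out = ""
--         pending = False
--         for j, d in enumerate(digs):
--             if d != '0':
--                 if pending:
--                     out += '零'
--                 out += digits[int(d)] + units[(n - 1 - j) % 9]
--                 pending = False
--             else:
--                 pending = True
--         return out + "元整" if out else "零元整"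
--     except:
--         return "转换出错"
-- ===== Notes on version B (the rewrite author's own statement) =====
-- stated objective: simpler
-- what changed: B makes a single most-significant-first pass with a pending-zero flag, emitting each digit+unit directly, instead of A's reverse-the-string pass that builds a list least-significant-first, reverses and joins it, and rstrips trailing zeros.
import Mathlib
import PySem

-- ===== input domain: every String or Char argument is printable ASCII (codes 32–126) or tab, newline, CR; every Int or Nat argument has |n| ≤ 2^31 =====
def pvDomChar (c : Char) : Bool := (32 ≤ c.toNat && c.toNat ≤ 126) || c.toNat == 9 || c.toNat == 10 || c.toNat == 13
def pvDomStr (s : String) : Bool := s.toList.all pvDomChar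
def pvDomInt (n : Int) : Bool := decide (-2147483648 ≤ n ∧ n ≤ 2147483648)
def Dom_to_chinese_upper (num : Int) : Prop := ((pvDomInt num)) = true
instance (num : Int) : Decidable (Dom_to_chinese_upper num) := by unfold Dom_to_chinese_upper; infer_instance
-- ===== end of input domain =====

-- B replaces A's reverse-build-then-reverse-join-then-rstrip pipeline by a single
-- most-significant-first pass with a pending-zero flag (objective: simpler); return values
-- are proved equal for every Int.

-- ===== PORT A =====
-- Shared literal constants of the two Pythons.
def pvUnits : List (List Char) := [[], ['拾'], ['佰'], ['仟'], ['万'], ['拾'], ['佰'], ['仟'], ['亿']]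
def pvDigits : List Char := ['零', '壹', '贰', '叁', '肆', '伍', '陆', '柒', '捌', '玖']

-- hand port of Python's  s.rstrip('零')  (exact: drops the maximal trailing run of '零')
def pvRstripZero (cs : List Char) : List Char :=
  (cs.reverse.dropWhile (fun c => c == '零')).reverse

-- A's loop over str(int(num))[::-1]. The Python list `res` (appended at its end, res[-1]
-- inspected) is held most-recent-first here, so Python's "".join(res[::-1]) is `flatten`
-- of this accumulator. `none` is an exception, caught by A's try/except.
def aLoop : List Char → Nat → List (List Char) → Option (List (List Char))
  | [], _, res => some res
  | d :: t, i, res =>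
    if d ≠ '0' then
      match PySem.List.pyGet? pvUnits ((i % 9 : Nat) : Int) with
      | none => none
      | some u =>
        match PySem.Int.ofChars? [d] with
        | none => none
        | some k =>
          match PySem.List.pyGet? pvDigits k with
          | none => none
          | some c => aLoop t (i + 1) ([c] :: u :: res)
    else
      if res = [] ∨ res.head? ≠ some ['零'] then aLoop t (i + 1) (['零'] :: res)
      else aLoop t (i + 1) res

def to_chinese_upper (num : Int) : String :=
  match aLoop (PySem.Int.toChars num).reverse 0 [] with
  | none => "转换出错"
  | some res =>
    let result := pvRstripZero res.flatten
    if result ≠ [] then String.ofList (result ++ ['元', '整']) else String.ofList ['零', '元', '整']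

-- ===== PORT B =====
-- B: one forward pass; `pending` records an unflushed zero run. (n - 1 - j) is Nat
-- subtraction: inside the loop j < n always, matching Python's n-1-j ≥ 0.
def bLoop : List Char → Nat → Nat → List Char → Bool → Option (List Char)
  | [], _, _, out, _ => some out
  | d :: t, n, j, out, pending =>
    if d ≠ '0' then
      match PySem.Int.ofChars? [d] with
      | none => none
      | some k =>
        match PySem.List.pyGet? pvDigits k with
        | none => none
        | some c =>
          match PySem.List.pyGet? pvUnits (((n - 1 - j) % 9 : Nat) : Int) with
          | none => none
          | some u =>
            bLoop t n (j + 1) ((if pending then out ++ ['零'] else out) ++ [c] ++ u) false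
    else bLoop t n (j + 1) out true

def to_chinese_upper_alt (num : Int) : String :=
  match bLoop (PySem.Int.toChars num) (PySem.Int.toChars num).length 0 [] false with
  | none => "转换出错"
  | some out =>
    if out ≠ [] then String.ofList (out ++ ['元', '整']) else String.ofList ['零', '元', '整']

-- ===== PRECONDITION & SPEC =====
def Spec_to_chinese_upper (num : Int) (out : String) : Prop := out = to_chinese_upper_alt num
instance (num : Int) (out : String) : Decidable (Spec_to_chinese_upper num out) := by unfold Spec_to_chinese_upper; infer_instance

-- ===== CLAIM (what is proved, stated in full; the proofs are below) =====
def Claim_equal_to_chinese_upper : Prop := ∀ (num : Int), Dom_to_chinese_upper num → Spec_to_chinese_upper num (to_chinese_upper num)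

-- ===== LEMMAS AND PROOFS =====

-- middle characterisation used by both bridges: one step per char of the FORWARD digit list,
-- mirroring A's per-char step (the unit index of the char at forward position with `t` chars
-- to its right is i + t.length); the Bool tracks A's res-head ("last piece is 零") flag.

def fSpec : List Char → Nat → Bool → Option (List Char × Bool)
  | [], _, z0 => some ([], z0)
  | d :: t, i, z0 =>
    match fSpec t i z0 with
    | none => none
    | some (s, z) =>
      if d ≠ '0' then
        match PySem.List.pyGet? pvUnits (((i + t.length) % 9 : Nat) : Int) with
        | none => none
        | some u =>
          match PySem.Int.ofChars? [d] with
          | none => none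
          | some k =>
            match PySem.List.pyGet? pvDigits k with
            | none => none
            | some c => some ([c] ++ u ++ s, decide (([c] : List Char) = ['零']))
      else if z then some (s, true) else some ('零' :: s, true)

def pvZflag (res : List (List Char)) : Bool := decide (res.head? = some ['零'])

def pvGood (c : Char) : Prop := c ∈ (['0', '1', '2', '3', '4', '5', '6', '7', '8', '9'] : List Char)

def pvVal (d : Char) : Int := (d.toNat : Int) - 48

def pvCh (d : Char) : Char := pvDigits.getD (d.toNat - 48) ' '

def pvUnit (m : Nat) : List Char := pvUnits.getD (m % 9) []

lemma aLoop_append (xs ys : List Char) : ∀ (i : Nat) (res : List (List Char)),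
    aLoop (xs ++ ys) i res =
      match aLoop xs i res with
      | none => none
      | some r => aLoop ys (i + xs.length) r := by
  induction xs with
  | nil => intro i res; simp [aLoop]
  | cons d t ih =>
    intro i res
    by_cases hd : d = '0'
    · subst hd
      simp only [List.cons_append, aLoop, ne_eq, not_true_eq_false, if_false]
      by_cases hres : res = [] ∨ res.head? ≠ some ['零']
      · rw [if_pos hres, if_pos hres, ih]
        rw [show i + 1 + t.length = i + (t.length + 1) from by omega]
        simp
      · rw [if_neg hres, if_neg hres, ih]
        rw [show i + 1 + t.length = i + (t.length + 1) from by omega]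
        simp
    · simp only [List.cons_append, aLoop, if_pos (show d ≠ '0' from hd)]
      cases hu : PySem.List.pyGet? pvUnits ((i % 9 : Nat) : Int) with
      | none => simp
      | some u =>
        dsimp only
        cases hk : PySem.Int.ofChars? [d] with
        | none => simp
        | some k =>
          dsimp only
          cases hc : PySem.List.pyGet? pvDigits k with
          | none => rfl
          | some c =>
            dsimp only
            rw [ih]
            rw [show i + 1 + t.length = i + (t.length + 1) from by omega]
            rfl

lemma aChar_some (L : List Char) : ∀ (i : Nat) (res : List (List Char)) (s : List Char) (z : Bool),
    fSpec L i (pvZflag res) = some (s, z) →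
    ∃ res', aLoop L.reverse i res = some res' ∧
      res'.flatten = s ++ res.flatten ∧ pvZflag res' = z := by
  induction L with
  | nil =>
    intro i res s z h
    simp only [fSpec, Option.some.injEq, Prod.mk.injEq] at h
    exact ⟨res, by simp [aLoop], by simp [h.1], by simp [h.2]⟩
  | cons d t ih =>
    intro i res s z h
    rw [List.reverse_cons, aLoop_append]
    simp only [fSpec] at h
    cases hf : fSpec t i (pvZflag res) with
    | none => rw [hf] at h; exact absurd h (by simp)
    | some p =>
      obtain ⟨s0, z0⟩ := p
      rw [hf] at h
      dsimp only at h
      obtain ⟨r, hr, hfl, hz⟩ := ih i res s0 z0 hf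
      rw [hr]
      dsimp only
      by_cases hd : d = '0'
      · subst hd
        rw [if_neg (by simp)] at h
        by_cases hz0 : z0 = true
        · subst hz0
          rw [if_pos rfl] at h
          simp only [Option.some.injEq, Prod.mk.injEq] at h
          obtain ⟨hs, hzz⟩ := h
          refine ⟨r, ?_, by rw [← hs]; exact hfl, by rw [← hzz]; exact hz⟩
          have hcond : ¬(r = [] ∨ r.head? ≠ some ['零']) := by
            have : r.head? = some ['零'] := by
              have := hz; simp only [pvZflag, decide_eq_true_eq] at this; exact this
            intro hco
            rcases hco with h1 | h2
            · rw [h1] at this; simp at this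
            · exact h2 this
          simp [aLoop, hcond]
        · have hz0' : z0 = false := by simpa using hz0
          subst hz0'
          rw [if_neg (by simp)] at h
          simp only [Option.some.injEq, Prod.mk.injEq] at h
          obtain ⟨hs, hzz⟩ := h
          have hcond : r = [] ∨ r.head? ≠ some ['零'] := by
            right
            intro hh
            rw [pvZflag, hh] at hz
            simp at hz
          refine ⟨['零'] :: r, ?_, ?_, ?_⟩
          · simp [aLoop, hcond]
          · simp [← hs, hfl]
          · rw [← hzz]; simp [pvZflag]
      · rw [if_pos hd] at h
        simp only [aLoop, List.length_reverse, if_pos (show d ≠ '0' from hd)]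
        cases hu : PySem.List.pyGet? pvUnits (((i + t.length) % 9 : Nat) : Int) with
        | none => rw [hu] at h; exact absurd h (by simp)
        | some u =>
          rw [hu] at h
          dsimp only at h ⊢
          cases hk : PySem.Int.ofChars? [d] with
          | none => rw [hk] at h; exact absurd h (by simp)
          | some k =>
            rw [hk] at h
            dsimp only at h ⊢
            cases hc : PySem.List.pyGet? pvDigits k with
            | none => rw [hc] at h; exact absurd h (by simp)
            | some c =>
              rw [hc] at h
              dsimp only at h ⊢
              simp only [Option.some.injEq, Prod.mk.injEq] at h
              obtain ⟨hs, hzz⟩ := h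
              refine ⟨[c] :: u :: r, by simp [aLoop], ?_, ?_⟩
              · simp [← hs, hfl]
              · rw [← hzz]; simp [pvZflag]

lemma digit_lookup : ∀ d ∈ (['1','2','3','4','5','6','7','8','9'] : List Char),
    PySem.Int.ofChars? [d] = some (pvVal d) ∧
    PySem.List.pyGet? pvDigits (pvVal d) = some (pvCh d) ∧ pvCh d ≠ '零' := by
  intro d hd
  fin_cases hd <;> exact ⟨by decide, by decide, by decide⟩

lemma unit_lookup (m : Nat) :
    PySem.List.pyGet? pvUnits ((m % 9 : Nat) : Int) = some (pvUnit m) ∧ pvUnit m ∈ pvUnits := by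
  have h : m % 9 < 9 := Nat.mod_lt _ (by norm_num)
  unfold pvUnit
  generalize hk : m % 9 = k at h ⊢
  interval_cases k <;> exact ⟨by decide, by decide⟩

lemma units_no_zero : ∀ u ∈ pvUnits, '零' ∉ u := by decide

lemma rstrip_append (x s : List Char) (hx : x ≠ []) (hz : '零' ∉ x) :
    pvRstripZero (x ++ s) = x ++ pvRstripZero s := by
  unfold pvRstripZero
  rw [List.reverse_append, List.dropWhile_append]
  split
  · next hall =>
    have h2 : List.dropWhile (fun c => c == '零') s.reverse = [] := by
      simpa [List.isEmpty_iff] using hall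
    have h1 : List.dropWhile (fun c => c == '零') x.reverse = x.reverse := by
      cases hxr : x.reverse with
      | nil => simp
      | cons a t =>
        rw [List.dropWhile_cons_of_neg]
        simp only [beq_eq_false_iff_ne, ne_eq, beq_iff_eq]
        intro hE
        apply hz
        rw [← List.mem_reverse, hxr, hE]
        exact List.mem_cons_self ..
    rw [h1, h2]
    simp
  · simp

lemma rstrip_cons_zero (s : List Char) (h : pvRstripZero s ≠ []) :
    pvRstripZero ('零' :: s) = '零' :: pvRstripZero s := by
  unfold pvRstripZero at *
  rw [show ('零' :: s).reverse = s.reverse ++ ['零'] by simp, List.dropWhile_append]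
  split
  · next hall =>
    exfalso
    apply h
    have h2 : List.dropWhile (fun c => c == '零') s.reverse = [] := by
      simpa [List.isEmpty_iff] using hall
    rw [h2]
    rfl
  · simp

lemma rstrip_ne_nil (a : Char) (s : List Char) (ha : a ≠ '零') :
    pvRstripZero (a :: s) ≠ [] := by
  unfold pvRstripZero
  rw [show (a :: s).reverse = s.reverse ++ [a] by simp, List.dropWhile_append]
  split
  · simp [ha]
  · simp

lemma fSpec_total : ∀ (t : List Char), (∀ c ∈ t, pvGood c) →
    ∃ s z, fSpec t 0 false = some (s, z) := by
  intro t
  induction t with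
  | nil => intro _; exact ⟨[], false, rfl⟩
  | cons d tt ih =>
    intro hg
    obtain ⟨s0, z0, hft⟩ := ih (fun c hc => hg c (List.mem_cons_of_mem _ hc))
    have hgd := hg d List.mem_cons_self
    simp only [fSpec, hft]
    by_cases hd0 : d = '0'
    · subst hd0
      rw [if_neg (by simp)]
      cases z0 <;> exact ⟨_, _, rfl⟩
    · have hd9 : d ∈ (['1','2','3','4','5','6','7','8','9'] : List Char) := by
        simp only [pvGood, List.mem_cons] at hgd
        rcases hgd with rfl | h
        · exact absurd rfl hd0
        · simpa using h
      obtain ⟨hk, hc, -⟩ := digit_lookup d hd9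
      obtain ⟨huL, -⟩ := unit_lookup tt.length
      rw [if_pos hd0]
      simp only [Nat.zero_add]
      rw [huL]
      dsimp only
      rw [hk]
      dsimp only
      rw [hc]
      exact ⟨_, _, rfl⟩

lemma bChar : ∀ (t : List Char), (∀ c ∈ t, pvGood c) → ∀ (s : List Char) (z : Bool),
    fSpec t 0 false = some (s, z) → ∀ (j : Nat) (out : List Char),
    bLoop t (j + t.length) j out false = some (out ++ pvRstripZero s) ∧
    bLoop t (j + t.length) j out true =
      some (out ++ (if z then pvRstripZero s
                    else if t.isEmpty then ([] : List Char) else '零' :: pvRstripZero s)) ∧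
    (z = true → s.head? = some '零') ∧
    (z = false → s.head? ≠ some '零' ∧ (t ≠ [] → s ≠ [])) := by
  intro t
  induction t with
  | nil =>
    intro _ s z hf j out
    simp only [fSpec, Option.some.injEq, Prod.mk.injEq] at hf
    obtain ⟨hs, hz⟩ := hf
    subst hs; subst hz
    refine ⟨by simp [bLoop, pvRstripZero], by simp [bLoop, pvRstripZero], by simp, ?_⟩
    intro _
    exact ⟨by simp, fun h => absurd rfl h⟩
  | cons d tt ih =>
    intro hg s z hf j out
    have hgd := hg d List.mem_cons_self
    have hgt : ∀ c ∈ tt, pvGood c := fun c hc => hg c (List.mem_cons_of_mem _ hc)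
    simp only [fSpec] at hf
    cases hft : fSpec tt 0 false with
    | none => rw [hft] at hf; exact absurd hf (by simp)
    | some p =>
      obtain ⟨s0, z0⟩ := p
      rw [hft] at hf
      dsimp only at hf
      by_cases hd0 : d = '0'
      · subst hd0
        rw [if_neg (by simp)] at hf
        have hstep : ∀ (p : Bool), bLoop ('0' :: tt) (j + ('0'::tt : List Char).length) j out p
            = bLoop tt ((j+1) + tt.length) (j+1) out true := by
          intro p
          simp only [bLoop, if_neg (by simp : ¬('0' ≠ '0'))]
          congr 1
          simp
          omega
        have IH := ih hgt s0 z0 hft (j+1) out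
        cases hz0 : z0
        · rw [hz0] at hf IH
          rw [if_neg (by simp)] at hf
          simp only [Option.some.injEq, Prod.mk.injEq] at hf
          obtain ⟨hs, hzz⟩ := hf
          subst hs
          have hzt : z = true := hzz.symm
          subst hzt
          obtain ⟨hB0, hB1, -, hC4⟩ := IH
          obtain ⟨hhead, hne⟩ := hC4 rfl
          have key : (if tt.isEmpty then ([] : List Char) else '零' :: pvRstripZero s0)
              = pvRstripZero ('零' :: s0) := by
            cases htt : tt with
            | nil =>
              subst htt
              simp only [fSpec, Option.some.injEq, Prod.mk.injEq] at hft
              rw [hft.1.symm]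
              decide
            | cons a t' =>
              have hs0ne : s0 ≠ [] := hne (by simp [htt])
              obtain ⟨b, s0', rfl⟩ := List.exists_cons_of_ne_nil hs0ne
              have hb : b ≠ '零' := by simpa using hhead
              rw [rstrip_cons_zero _ (rstrip_ne_nil _ _ hb)]
              simp
          refine ⟨?_, ?_, by simp, by simp⟩
          · rw [hstep, hB1]
            simp only [Bool.false_eq_true, if_false]
            rw [key]
          · rw [hstep, hB1]
            simp only [Bool.false_eq_true, if_false, if_true]
            rw [key]
        · rw [hz0] at hf IH
          rw [if_pos rfl] at hf
          simp only [Option.some.injEq, Prod.mk.injEq] at hf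
          obtain ⟨hs, hzz⟩ := hf
          subst hs
          have hzt : z = true := hzz.symm
          subst hzt
          obtain ⟨hB0, hB1, hC3, -⟩ := IH
          refine ⟨?_, ?_, fun _ => hC3 rfl, by simp⟩
          · rw [hstep, hB1]; simp
          · rw [hstep, hB1]; simp
      · have hd9 : d ∈ (['1','2','3','4','5','6','7','8','9'] : List Char) := by
          simp only [pvGood, List.mem_cons] at hgd
          rcases hgd with rfl | h
          · exact absurd rfl hd0
          · simpa using h
        obtain ⟨hk, hc, hcz⟩ := digit_lookup d hd9
        obtain ⟨huL, humem⟩ := unit_lookup tt.length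
        rw [if_pos hd0] at hf
        simp only [Nat.zero_add] at hf
        rw [huL] at hf
        dsimp only at hf
        rw [hk] at hf
        dsimp only at hf
        rw [hc] at hf
        dsimp only at hf
        simp only [Option.some.injEq, Prod.mk.injEq] at hf
        obtain ⟨hs, hzz⟩ := hf
        have hzf : z = false := by
          rw [← hzz]
          simp [hcz]
        subst hzf
        subst hs
        have hx1 : ([pvCh d] ++ pvUnit tt.length : List Char) ≠ [] := by simp
        have hx2 : '零' ∉ ([pvCh d] ++ pvUnit tt.length : List Char) := by
          intro hmem
          rcases List.mem_append.mp hmem with h1 | h2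
          · have h1' : '零' = pvCh d := by simpa using h1
            exact hcz h1'.symm
          · exact units_no_zero _ humem h2
        have hr : pvRstripZero ([pvCh d] ++ pvUnit tt.length ++ s0)
            = [pvCh d] ++ pvUnit tt.length ++ pvRstripZero s0 :=
          rstrip_append _ _ hx1 hx2
        have hstep : ∀ (p : Bool), bLoop (d :: tt) (j + (d::tt : List Char).length) j out p
            = bLoop tt ((j+1) + tt.length) (j+1)
                ((if p then out ++ ['零'] else out) ++ [pvCh d] ++ pvUnit tt.length) false := by
          intro p
          simp only [bLoop, if_pos hd0]
          rw [hk]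
          dsimp only
          rw [hc]
          dsimp only
          rw [show (j + (d::tt : List Char).length) - 1 - j = tt.length from by
            simp only [List.length_cons]; omega]
          rw [huL]
          dsimp only
          congr 1
          simp only [List.length_cons]
          omega
        obtain ⟨hB0, -, -, -⟩ := ih hgt s0 z0 hft (j+1) (out ++ [pvCh d] ++ pvUnit tt.length)
        obtain ⟨hB0', -, -, -⟩ := ih hgt s0 z0 hft (j+1) (out ++ ['零'] ++ [pvCh d] ++ pvUnit tt.length)
        refine ⟨?_, ?_, by simp, ?_⟩
        · rw [hstep]
          simp only [Bool.false_eq_true, if_false]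
          rw [hB0, hr]
          simp
        · rw [hstep]
          simp only [reduceIte]
          rw [hB0', hr]
          simp
        · intro _
          constructor
          · intro hcc
            apply hcz
            simpa using hcc
          · intro _
            simp

lemma digitChar_good (m : Nat) (h : m < 10) : pvGood (Nat.digitChar m) := by
  interval_cases m <;> simp [pvGood, Nat.digitChar]

lemma toDigitsCore_good : ∀ (f n : Nat) (acc : List Char), (∀ c ∈ acc, pvGood c) →
    ∀ c ∈ Nat.toDigitsCore 10 f n acc, pvGood c := by
  intro f
  induction f with
  | zero => intro n acc hacc c hc; exact hacc c hc
  | succ f ih =>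
    intro n acc hacc c hc
    simp only [Nat.toDigitsCore] at hc
    have hd : ∀ c' ∈ (n % 10).digitChar :: acc, pvGood c' := by
      intro c' hc'
      rcases List.mem_cons.mp hc' with rfl | hm
      · exact digitChar_good _ (Nat.mod_lt _ (by norm_num))
      · exact hacc c' hm
    by_cases hz : n / 10 = 0
    · rw [if_pos hz] at hc
      exact hd c hc
    · rw [if_neg hz] at hc
      exact ih (n / 10) _ hd c hc

lemma toDigits_good (n : Nat) : ∀ c ∈ Nat.toDigits 10 n, pvGood c :=
  toDigitsCore_good (n + 1) n [] (by simp)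

theorem main_eq (num : Int) : to_chinese_upper num = to_chinese_upper_alt num := by
  unfold to_chinese_upper to_chinese_upper_alt
  by_cases h : num < 0
  · have hT : PySem.Int.toChars num = '-' :: Nat.toDigits 10 num.natAbs := by
      simp [PySem.Int.toChars, h]
    rw [hT]
    rw [List.reverse_cons, aLoop_append]
    have hBside : bLoop ('-' :: Nat.toDigits 10 num.natAbs)
        ('-' :: Nat.toDigits 10 num.natAbs : List Char).length 0 [] false = none := by
      simp only [bLoop, if_pos (show '-' ≠ '0' from by decide)]
      rw [show PySem.Int.ofChars? ['-'] = none from by decide]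
    rw [hBside]
    cases ha : aLoop (Nat.toDigits 10 num.natAbs).reverse 0 [] with
    | none => rfl
    | some r =>
      dsimp only
      simp only [aLoop, if_pos (show '-' ≠ '0' from by decide)]
      obtain ⟨huL, -⟩ := unit_lookup (0 + (Nat.toDigits 10 num.natAbs).reverse.length)
      rw [huL]
      dsimp only
      rw [show PySem.Int.ofChars? ['-'] = none from by decide]
  · have hT : PySem.Int.toChars num = Nat.toDigits 10 num.toNat := by
      simp [PySem.Int.toChars, h]
    rw [hT]
    have hgood := toDigits_good num.toNat
    obtain ⟨s, z, hf⟩ := fSpec_total _ hgood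
    obtain ⟨res', hres, hfl, -⟩ := aChar_some (Nat.toDigits 10 num.toNat) 0 [] s z
      (by rw [show pvZflag ([] : List (List Char)) = false from by decide]; exact hf)
    obtain ⟨hB0, -, -, -⟩ := bChar _ hgood s z hf 0 []
    rw [Nat.zero_add] at hB0
    rw [hres, hB0]
    dsimp only
    rw [show res'.flatten = s from by simpa using hfl]
    simp

-- ===== VERDICT (by name: the statement is the Claim_ definition above) =====
theorem to_chinese_upper_spec : Claim_equal_to_chinese_upper := by
  intro num _
  unfold Spec_to_chinese_upper
  exact main_eq num
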